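-- pv_equiv track=rewrite | github.com/T-MSD/FP-Project1 | src/P1.py | obter_pin
-- ===== SOURCE A (Python) =====
-- def obter_posicao(move, pos):
--   stay = {
--     1:["E","C"],
--     2:"C",
--     3:["D","C"],
--     4:"E",
--     6:"D",
--     7:["E","B"],
--     8:"B",
--     9:["D","B"]
--   }
--
--   if pos != 5 and move in stay[pos]:
--     return pos
--   else:
--      if move == "E":
--        return pos - 1
--      elif move == "D":
--        return pos + 1
--      elif move == "C":
--        if pos == 5:
--          return pos - 3
--        return pos - 3
--      elif move == "B":
--        if pos == 5:
--          return pos + 3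
--        return pos + 3
--
-- def obter_digito(move, pos):
--   for c in move:
--     pos = obter_posicao(c, pos)
--   return pos
--
-- def check_pin(moves):
--   if not isinstance(moves, tuple):
--     return False
--   if len(moves) < 4 or len(moves) > 10:
--     return False
--   for move in moves:
--     if len(move) < 1:
--       return False
--     for c in move:
--       if not isinstance(c, str) or c not in ["C", "B", "D", "E"]:
--         return False
--   return True
--
-- def obter_pin(moves):
--   if check_pin(moves):
--     pos = 5
--     pin = ()
--     for move in moves:
--       pos = obter_digito(move, pos)
--       pin += (pos,)
--     return pin
--   else:
--     raise ValueError('obter_pin: argumento invalido')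
-- ===== SOURCE B (Python) =====
-- def obter_pin(moves):
--     if not (isinstance(moves, tuple)
--             and 4 <= len(moves) <= 10
--             and all(m and all(c in "CBDE" for c in m) for m in moves)):
--         raise ValueError('obter_pin: argumento invalido')
--     row, col = 1, 1
--     pin = []
--     for move in moves:
--         for c in move:
--             if c == "E":
--                 col = max(col - 1, 0)
--             elif c == "D":
--                 col = min(col + 1, 2)
--             elif c == "C":
--                 row = max(row - 1, 0)
--             else:  # "B"
--                 row = min(row + 1, 2)
--         pin.append(row * 3 + col + 1)
--     return tuple(pin)
-- ===== Notes on version B (the rewrite author's own statement) =====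
-- stated objective: idiomatic
-- what changed: B replaces A's hardcoded nine-entry 'stay' edge table and the stay/else membership dispatch by a (row, col) coordinate state updated per character and clamped into [0,2] with max/min, converting back to the digit only once per move; the validation becomes a single all(...) guard.
import Mathlib
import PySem

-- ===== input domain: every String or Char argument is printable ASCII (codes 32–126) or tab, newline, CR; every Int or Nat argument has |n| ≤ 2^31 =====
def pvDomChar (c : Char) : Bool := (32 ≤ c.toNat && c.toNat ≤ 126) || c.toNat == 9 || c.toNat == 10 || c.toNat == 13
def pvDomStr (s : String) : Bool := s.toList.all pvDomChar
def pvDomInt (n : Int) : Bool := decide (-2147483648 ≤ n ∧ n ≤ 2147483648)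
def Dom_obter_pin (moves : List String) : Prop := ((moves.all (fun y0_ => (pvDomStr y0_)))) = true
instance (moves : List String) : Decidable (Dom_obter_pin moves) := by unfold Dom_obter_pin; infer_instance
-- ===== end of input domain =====

-- B replaces A's hardcoded nine-entry 'stay' edge table by a (row, col) coordinate state
-- clamped into [0,2] with max/min (idiomatic grid simulation); return value only — on
-- invalid input both Pythons raise ValueError (excluded by Pre_).

-- ===== PORT A =====
-- the 'stay' dict of A (values that are Python strings are their character lists)
def stayA : PySem.Dict Int (List Char) :=
  PySem.Dict.ofList [(1, ['E','C']), (2, ['C']), (3, ['D','C']), (4, ['E']),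
                     (6, ['D']), (7, ['E','B']), (8, ['B']), (9, ['D','B'])]

def obter_posicao (move : Char) (pos : Int) : Int :=
  -- Python's `pos != 5 and move in stay[pos]`; stay[pos] is only evaluated when pos ≠ 5
  -- (getD with [] stands for the lookup; a KeyError is unreachable from obter_pin's valid inputs)
  if pos ≠ 5 ∧ move ∈ stayA.getD pos [] then pos
  else if move = 'E' then pos - 1
  else if move = 'D' then pos + 1
  else if move = 'C' then (if pos = 5 then pos - 3 else pos - 3)
  else if move = 'B' then (if pos = 5 then pos + 3 else pos + 3)
  else pos  -- unreachable from obter_pin (check_pin rejects other chars; Python would return None)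

def obter_digito (move : String) (pos : Int) : Int :=
  move.toList.foldl (fun p c => obter_posicao c p) pos

def check_pin (moves : List String) : Bool :=
  -- isinstance(moves, tuple) is always true under the type convention
  if moves.length < 4 || moves.length > 10 then false
  else moves.all (fun m =>
    decide (1 ≤ m.toList.length) &&
    m.toList.all (fun c => decide (c ∈ ['C','B','D','E'])))

def obter_pin (moves : List String) : List Int :=
  if check_pin moves then
    (moves.foldl (fun (st : Int × List Int) move =>
        let pos := obter_digito move st.1
        (pos, st.2 ++ [pos])) (5, [])).2
  else []  -- Python raises ValueError here; excluded by Pre_obter_pin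

-- ===== PORT B =====
def stepB (c : Char) (rc : Int × Int) : Int × Int :=
  if c = 'E' then (rc.1, max (rc.2 - 1) 0)
  else if c = 'D' then (rc.1, min (rc.2 + 1) 2)
  else if c = 'C' then (max (rc.1 - 1) 0, rc.2)
  else (min (rc.1 + 1) 2, rc.2)

def check_pin_alt (moves : List String) : Bool :=
  (decide (4 ≤ moves.length) && decide (moves.length ≤ 10)) &&
  moves.all (fun m => !m.toList.isEmpty && m.toList.all (fun c => decide (c ∈ "CBDE".toList)))

def obter_pin_alt (moves : List String) : List Int :=
  if check_pin_alt moves then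
    (moves.foldl (fun (st : (Int × Int) × List Int) move =>
        let rc := move.toList.foldl (fun rc c => stepB c rc) st.1
        (rc, st.2 ++ [rc.1 * 3 + rc.2 + 1])) ((1, 1), [])).2
  else []  -- Python raises ValueError here; excluded by Pre_obter_pin

-- ===== PRECONDITION & SPEC =====
-- Pre_ excludes exactly the inputs check_pin rejects, on which Python A raises ValueError (B raises too).
def Pre_obter_pin (moves : List String) : Prop :=
  4 ≤ moves.length ∧ moves.length ≤ 10 ∧
  (moves.all (fun m => !m.toList.isEmpty &&
    m.toList.all (fun c => decide (c ∈ (['C','B','D','E'] : List Char))))) = true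
instance (moves : List String) : Decidable (Pre_obter_pin moves) := by unfold Pre_obter_pin; infer_instance

def pvWitness_obter_pin : List String := ["C", "B", "D", "E"]

def Spec_obter_pin (moves : List String) (out : List Int) : Prop := out = obter_pin_alt moves
instance (moves : List String) (out : List Int) : Decidable (Spec_obter_pin moves out) := by unfold Spec_obter_pin; infer_instance

-- ===== CLAIM (what is proved, stated in full; the proofs are below) =====
def Claim_equal_obter_pin : Prop := ∀ (moves : List String), Dom_obter_pin moves → Pre_obter_pin moves → Spec_obter_pin moves (obter_pin moves)

-- ===== LEMMAS AND PROOFS =====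

-- the two validity checks compute the same Bool
theorem check_eq (moves : List String) : check_pin moves = check_pin_alt moves := by
  unfold check_pin check_pin_alt
  have hs : ("CBDE".toList : List Char) = ['C','B','D','E'] := rfl
  rw [hs]
  have hm : ∀ m : String,
      (decide (1 ≤ m.toList.length) && m.toList.all (fun c => decide (c ∈ (['C','B','D','E'] : List Char))))
      = (!m.toList.isEmpty && m.toList.all (fun c => decide (c ∈ (['C','B','D','E'] : List Char)))) := by
    intro m; cases m.toList <;> simp
  simp only [hm]
  split_ifs with h
  · rcases Bool.or_eq_true_iff.mp h with h' | h' <;>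
      simp_all
  · have h4 : 4 ≤ moves.length := by
      by_contra hc
      exact absurd (by simp; omega : (moves.length < 4 || moves.length > 10) = true) h
    have h10 : moves.length ≤ 10 := by
      by_contra hc
      exact absurd (by simp; omega : (moves.length < 4 || moves.length > 10) = true) h
    simp [h4, h10]

def RelRC (pos : Int) (rc : Int × Int) : Prop :=
  0 ≤ rc.1 ∧ rc.1 ≤ 2 ∧ 0 ≤ rc.2 ∧ rc.2 ≤ 2 ∧ pos = rc.1 * 3 + rc.2 + 1

theorem step_rel (c : Char) (hc : c ∈ (['C','B','D','E'] : List Char))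
    (pos : Int) (rc : Int × Int) (h : RelRC pos rc) :
    RelRC (obter_posicao c pos) (stepB c rc) := by
  obtain ⟨r, col⟩ := rc
  obtain ⟨h0, h1, h2, h3, hp⟩ := h
  subst hp
  fin_cases hc <;>
    (interval_cases r <;> interval_cases col <;>
      simp [RelRC, obter_posicao, stepB, stayA] <;> decide)

theorem fold_rel (l : List Char) (hl : ∀ c ∈ l, c ∈ (['C','B','D','E'] : List Char))
    (pos : Int) (rc : Int × Int) (h : RelRC pos rc) :
    RelRC (l.foldl (fun p c => obter_posicao c p) pos) (l.foldl (fun rc c => stepB c rc) rc) := by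
  induction l generalizing pos rc with
  | nil => exact h
  | cons a t ih =>
      exact ih (fun c hc => hl c (List.mem_cons_of_mem _ hc))
        _ _ (step_rel a (hl a (List.mem_cons_self ..)) pos rc h)

theorem outer_rel (moves : List String)
    (hv : ∀ m ∈ moves, ∀ c ∈ m.toList, c ∈ (['C','B','D','E'] : List Char))
    (pos : Int) (rc : Int × Int) (h : RelRC pos rc) (acc : List Int) :
    (moves.foldl (fun (st : Int × List Int) move =>
        let p := obter_digito move st.1
        (p, st.2 ++ [p])) (pos, acc)).2
    = (moves.foldl (fun (st : (Int × Int) × List Int) move =>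
        let rc := move.toList.foldl (fun rc c => stepB c rc) st.1
        (rc, st.2 ++ [rc.1 * 3 + rc.2 + 1])) (rc, acc)).2 := by
  induction moves generalizing pos rc acc with
  | nil => rfl
  | cons m t ih =>
      have hm := fold_rel m.toList (hv m (List.mem_cons_self ..)) pos rc h
      have hp : m.toList.foldl (fun p c => obter_posicao c p) pos
          = (m.toList.foldl (fun rc c => stepB c rc) rc).1 * 3
            + (m.toList.foldl (fun rc c => stepB c rc) rc).2 + 1 := hm.2.2.2.2
      simp only [List.foldl_cons, obter_digito]
      rw [hp] at hm ⊢
      exact ih (fun m' hm' => hv m' (List.mem_cons_of_mem _ hm')) _ _ hm _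

theorem check_valid (moves : List String) (h : check_pin moves = true) :
    ∀ m ∈ moves, ∀ c ∈ m.toList, c ∈ (['C','B','D','E'] : List Char) := by
  unfold check_pin at h
  split_ifs at h
  intro m hm c hc
  have := List.all_eq_true.mp h m hm
  have := (Bool.and_eq_true_iff.mp this).2
  have := List.all_eq_true.mp this c hc
  simpa using this

-- ===== VERDICT (by name: the statement is the Claim_ definition above) =====
theorem obter_pin_spec : Claim_equal_obter_pin := by
  intro moves _ _
  unfold Spec_obter_pin obter_pin obter_pin_alt
  rw [← check_eq]
  by_cases h : check_pin moves = true
  · simp only [h, if_true]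
    exact outer_rel moves (check_valid moves h) 5 (1, 1) (by norm_num [RelRC]) []
  · simp [h]
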